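-- pv_equiv track=rewrite | github.com/nirmalthummar/practice | 50 days task/day45.py | analyse_string
-- ===== SOURCE A (Python) =====
-- def analyse_string(string):
--     special_characters = "#$%&'()*+,-./:;<=>?@[\]^_`{|}~"
--     special_count = sum(string.count(char) for char in special_characters)
--     word_count = len(string.split())
--     total_characters = len(string.replace(" ", ""))
--
--     analysis = {
--         "special characters": special_count,
--         "words": word_count,
--         "total characters": total_characters
--     }
--
--     return analysis
-- ===== SOURCE B (Python) =====
-- def analyse_string(string):
--     special_characters = set("#$%&'()*+,-./:;<=>?@[\]^_`{|}~")
--     special_count = 0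
--     word_count = 0
--     total_characters = 0
--     in_whitespace = True
--     for ch in string:
--         if ch in special_characters:
--             special_count += 1
--         if ch != " ":
--             total_characters += 1
--         if ch.isspace():
--             in_whitespace = True
--         else:
--             if in_whitespace:
--                 word_count += 1
--             in_whitespace = False
--     return {
--         "special characters": special_count,
--         "words": word_count,
--         "total characters": total_characters,
--     }
-- ===== Notes on version B (the rewrite author's own statement) =====
-- stated objective: alternative
-- what changed: A's three separate passes (one str.count call per special character, split(), replace()) are replaced by a single loop over the characters maintaining three accumulators and an in-whitespace flag for word counting.
import Mathlib
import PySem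

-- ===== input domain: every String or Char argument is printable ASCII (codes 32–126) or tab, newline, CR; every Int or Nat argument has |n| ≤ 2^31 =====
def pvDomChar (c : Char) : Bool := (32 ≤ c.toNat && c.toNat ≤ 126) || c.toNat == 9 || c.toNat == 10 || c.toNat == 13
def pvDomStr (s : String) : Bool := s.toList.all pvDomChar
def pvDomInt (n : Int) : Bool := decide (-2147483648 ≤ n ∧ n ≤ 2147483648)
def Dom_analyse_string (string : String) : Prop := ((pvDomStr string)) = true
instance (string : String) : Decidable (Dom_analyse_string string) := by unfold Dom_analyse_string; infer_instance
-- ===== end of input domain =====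

-- B replaces A's three separate passes (one str.count per special character, split(), replace())
-- by a single loop over the characters with three accumulators and an in-whitespace flag (objective: alternative single-pass decomposition).

-- ===== PORT A =====
def analyse_string (string : String) : List (String × Int) :=
  let special_characters : String := "#$%&'()*+,-./:;<=>?@[\\]^_`{|}~"
  let special_count : Int :=
    (special_characters.toList.map (fun ch => (PySem.Str.count string (String.ofList [ch]) : Int))).sum
  let word_count : Int := ((PySem.Str.split₀ string).length : Int)
  let total_characters : Int := (PySem.Str.len (PySem.Str.replace string " " "") : Int)
  (((PySem.Dict.empty.insert "special characters" special_count).insert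
      "words" word_count).insert "total characters" total_characters).items

-- ===== PORT B =====
-- the loop body of Source B's single pass: (special_count, total_characters, word_count, in_whitespace)
def pvStep (sp : PySem.Set Char) (st : Int × Int × Int × Bool) (ch : Char) : Int × Int × Int × Bool :=
  let sc := if ch ∈ sp then st.1 + 1 else st.1
  let tc := if ch ≠ ' ' then st.2.1 + 1 else st.2.1
  if PySem.Chars.isspace ch then (sc, tc, st.2.2.1, true)
  else (sc, tc, (if st.2.2.2 then st.2.2.1 + 1 else st.2.2.1), false)

def analyse_string_alt (string : String) : List (String × Int) :=
  let specials : PySem.Set Char := PySem.Set.ofList "#$%&'()*+,-./:;<=>?@[\\]^_`{|}~".toList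
  let r : Int × Int × Int × Bool := string.toList.foldl (pvStep specials) (0, 0, 0, true)
  [("special characters", r.1), ("words", r.2.2.1), ("total characters", r.2.1)]

-- ===== PRECONDITION & SPEC =====
def Spec_analyse_string (string : String) (out : List (String × Int)) : Prop := out = analyse_string_alt string
instance (string : String) (out : List (String × Int)) : Decidable (Spec_analyse_string string out) := by unfold Spec_analyse_string; infer_instance

-- ===== CLAIM (what is proved, stated in full; the proofs are below) =====
def Claim_equal_analyse_string : Prop := ∀ (string : String), Dom_analyse_string string → Spec_analyse_string string (analyse_string string)

-- ===== LEMMAS AND PROOFS =====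

-- str.count with a single-character needle is the character count
theorem pv_countgo (c : Char) : ∀ (l : List Char) (fuel acc : Nat), l.length ≤ fuel →
    PySem.Chars.count.go [c] fuel l acc = acc + l.count c := by
  intro l
  induction l with
  | nil => intro fuel acc h; cases fuel <;> simp [PySem.Chars.count.go]
  | cons x t ih =>
    intro fuel acc h
    cases fuel with
    | zero => simp at h
    | succ f =>
      simp only [PySem.Chars.count.go]
      by_cases hx : x = c
      · subst hx
        simp [List.isPrefixOf, ih _ _ (by simpa using h)]
        omega
      · simp [List.isPrefixOf, hx, Ne.symm hx, ih _ _ (by simpa using h)]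

theorem pv_count_single (c : Char) (l : List Char) : PySem.Chars.count l [c] = l.count c := by
  simp [PySem.Chars.count, pv_countgo c l l.length 0 le_rfl]

-- s.replace(" ", "") keeps exactly the non-space characters
theorem pv_replgo : ∀ (l : List Char) (fuel : Nat) (acc : List Char), l.length ≤ fuel →
    (PySem.Chars.replace.go [' '] [] fuel l acc).length = acc.length + l.countP (fun c => c ≠ ' ') := by
  intro l
  induction l with
  | nil => intro fuel acc h; cases fuel <;> simp [PySem.Chars.replace.go]
  | cons x t ih =>
    intro fuel acc h
    cases fuel with
    | zero => simp at h
    | succ f =>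
      simp only [PySem.Chars.replace.go]
      by_cases hx : x = ' '
      · subst hx
        simp [List.isPrefixOf, List.countP_cons, ih _ _ (by simpa using h)]
      · simp [List.isPrefixOf, hx, Ne.symm hx, List.countP_cons, ih _ _ (by simpa using h)]
        omega

theorem pv_repl_len (l : List Char) :
    (PySem.Chars.replace l [' '] []).length = l.countP (fun c => c ≠ ' ') := by
  simp [PySem.Chars.replace, pv_replgo l l.length [] le_rfl]

-- word counter driven by an in-whitespace flag (B's word logic, as a recursion)
def pv_wcount : Bool → List Char → Nat
  | _, [] => 0
  | inws, c :: t =>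
    if PySem.Chars.isspace c then pv_wcount true t
    else (if inws then 1 else 0) + pv_wcount false t

-- len(s.split()) counts the maximal non-whitespace runs
theorem pv_splitgo : ∀ (l cur : List Char) (acc : List (List Char)),
    (PySem.Chars.split₀.go l cur acc).length =
      acc.length + (if cur.isEmpty then 0 else 1) + pv_wcount cur.isEmpty l := by
  intro l
  induction l with
  | nil => intro cur acc; by_cases h : cur.isEmpty <;> simp [PySem.Chars.split₀.go, h, pv_wcount]
  | cons c t ih =>
    intro cur acc
    simp only [PySem.Chars.split₀.go]
    by_cases hs : PySem.Chars.isspace c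
    · by_cases hc : cur.isEmpty <;> simp [hs, hc, ih, pv_wcount]
    · by_cases hc : cur.isEmpty <;> simp [hs, hc, ih, pv_wcount] <;> omega

theorem pv_split_len (l : List Char) : (PySem.Chars.split₀ l).length = pv_wcount true l := by
  simp [PySem.Chars.split₀, pv_splitgo l [] []]

-- the per-character counts of A's genexpr sum to one membership count (distinct needles)
theorem pv_sum_counts (sp : List Char) (hnd : sp.Nodup) :
    ∀ l : List Char, (sp.map (fun ch => (l.count ch : Int))).sum = (l.countP (fun c => c ∈ sp) : Int) := by
  intro l
  induction l with
  | nil => simp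
  | cons x t ih =>
    simp only [List.count_cons, List.countP_cons]
    push_cast
    rw [PySem.List.sum_map_add_int, ih]
    rw [show (fun ch => if x == ch then (1:Int) else 0) = (fun ch => if (fun c => x == c) ch then (1:Int) else 0) from rfl,
       PySem.List.sum_map_ite_one_zero]
    have h2 : sp.countP (fun ch => x == ch) = sp.count x := by
      unfold List.count
      apply List.countP_congr
      intro a _
      rw [Bool.beq_comm (a := x) (b := a)]
    rw [h2]
    by_cases hx : x ∈ sp
    · rw [List.count_eq_one_of_mem hnd hx]; simp [hx]
    · rw [List.count_eq_zero.mpr hx]; simp [hx]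

-- the final in-whitespace flag of B's fold
def pv_endfl (inws : Bool) : List Char → Bool
  | [] => inws
  | c :: t => pv_endfl (PySem.Chars.isspace c) t

theorem pv_fold_inv (sp : PySem.Set Char) : ∀ (l : List Char) (sc tc wc : Int) (inws : Bool),
    l.foldl (pvStep sp) (sc, tc, wc, inws) =
      (sc + (l.countP (fun c => c ∈ sp) : Int),
       tc + (l.countP (fun c => c ≠ ' ') : Int),
       wc + (pv_wcount inws l : Int),
       pv_endfl inws l) := by
  intro l
  induction l with
  | nil => intro sc tc wc inws; simp [pv_wcount, pv_endfl]
  | cons c t ih =>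
    intro sc tc wc inws
    simp only [List.foldl_cons]
    have hstep : pvStep sp (sc, tc, wc, inws) c =
        ((if c ∈ sp then sc + 1 else sc),
         (if c ≠ ' ' then tc + 1 else tc),
         (if PySem.Chars.isspace c then wc else if inws then wc + 1 else wc),
         (PySem.Chars.isspace c)) := by
      simp only [pvStep]
      split_ifs <;> simp_all
    rw [hstep, ih]
    simp only [List.countP_cons, pv_wcount, pv_endfl, Prod.mk.injEq]
    and_intros <;> (try trivial) <;> split_ifs <;> push_cast <;> simp_all <;> omega

theorem pv_dict3 (a b c : Int) :
    (((PySem.Dict.empty.insert "special characters" a).insert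
        "words" b).insert "total characters" c).items =
      [("special characters", a), ("words", b), ("total characters", c)] := by
  rfl

-- ===== VERDICT (by name: the statement is the Claim_ definition above) =====
theorem analyse_string_spec : Claim_equal_analyse_string := by
  intro s _
  unfold Spec_analyse_string
  simp only [analyse_string, analyse_string_alt]
  rw [pv_dict3, pv_fold_inv]
  have hmap : (fun ch => (PySem.Str.count s (String.ofList [ch]) : Int)) =
      fun ch => ((s.toList.count ch : Nat) : Int) := by
    funext ch
    simp [pv_count_single]
  rw [hmap, pv_sum_counts _ (by decide)]
  have hmem : s.toList.countP (fun c => c ∈ "#$%&'()*+,-./:;<=>?@[\\]^_`{|}~".toList) =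
      s.toList.countP (fun c => c ∈ PySem.Set.ofList "#$%&'()*+,-./:;<=>?@[\\]^_`{|}~".toList) := by
    apply List.countP_congr
    intro a _
    simp [PySem.Set.mem_ofList]
  have hrep : (PySem.Str.len (PySem.Str.replace s " " "") : Int) =
      (s.toList.countP (fun c => c ≠ ' ') : Int) := by
    have : (PySem.Str.replace s " " "").toList = PySem.Chars.replace s.toList [' '] [] := by
      simp [PySem.Str.toList_replace]
    simp [PySem.Str.len_eq, ← String.length_toList, this, pv_repl_len]
  have hsp : ((PySem.Str.split₀ s).length : Int) = (pv_wcount true s.toList : Int) := by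
    simp [PySem.Str.split₀, pv_split_len]
  rw [hmem, hrep, hsp]
  simp
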